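-- pv_equiv track=rewrite | github.com/matthieuCantat/python | script/alignBetween2Vertices.py | getVerticesBetween2Vertices_getMainPath
-- ===== SOURCE A (Python) =====
-- def getVerticesBetween2Vertices_getMainPath( pathsA , pathsB ):
--
-- 	mainPath = []
--
-- 	for iA in range( 0 , len(pathsA)):
-- 		for iB in range( 0 , len( pathsB ) ):
-- 			for elemA in pathsA[iA]:
-- 				if( elemA in pathsB[iB] ):
-- 					mainPath = pathsA[iA] + list(reversed(pathsB[iB]))
-- 					break
--
-- 	return mainPath
-- ===== SOURCE B (Python) =====
-- def getVerticesBetween2Vertices_getMainPath(pathsA, pathsB):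
--     # Precompute membership sets for the B-paths; scan pairs in reverse
--     # (last-overwrite-wins) order and return the first intersecting pair.
--     bsets = [set(pb) for pb in pathsB]
--     for pa in reversed(pathsA):
--         for i in range(len(pathsB) - 1, -1, -1):
--             if any(e in bsets[i] for e in pa):
--                 return pa + pathsB[i][::-1]
--     return []
-- ===== Notes on version B (the rewrite author's own statement) =====
-- stated objective: faster
-- what changed: Instead of running all A*B pair checks with list membership and keeping the last overwrite, B precomputes a set per B-path and scans pairs in reverse order, returning at the first intersecting pair.
import Mathlib
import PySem

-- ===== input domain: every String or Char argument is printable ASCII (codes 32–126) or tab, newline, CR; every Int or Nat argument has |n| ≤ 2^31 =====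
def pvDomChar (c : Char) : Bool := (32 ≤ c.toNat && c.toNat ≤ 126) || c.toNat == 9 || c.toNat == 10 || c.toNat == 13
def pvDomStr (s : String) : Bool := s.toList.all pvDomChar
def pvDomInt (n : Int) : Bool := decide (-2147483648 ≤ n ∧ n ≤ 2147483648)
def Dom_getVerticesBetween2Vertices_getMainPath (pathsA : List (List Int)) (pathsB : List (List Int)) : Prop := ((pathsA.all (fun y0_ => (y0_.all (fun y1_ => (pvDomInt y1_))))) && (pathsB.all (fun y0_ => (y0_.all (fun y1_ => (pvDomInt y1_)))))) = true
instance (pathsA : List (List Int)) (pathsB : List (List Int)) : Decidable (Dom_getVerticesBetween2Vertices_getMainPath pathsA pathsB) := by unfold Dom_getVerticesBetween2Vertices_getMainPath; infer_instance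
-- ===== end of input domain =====

-- B replaces A's exhaustive last-overwrite triple loop by a reverse scan over
-- precomputed B-path sets returning at the first intersecting pair (objective: faster).


-- ===== PORT A =====
-- 'for elemA in pathsA[iA]: if elemA in pathsB[iB]: mainPath = …; break'
def aElemLoop (paFull pb main : List Int) : List Int → List Int
  | [] => main
  | e :: t => if pb.contains e then paFull ++ pb.reverse else aElemLoop paFull pb main t

def getVerticesBetween2Vertices_getMainPath (pathsA : List (List Int)) (pathsB : List (List Int)) : List Int :=
  (PySem.List.pyRange 0 pathsA.length 1).foldl (fun main iA =>
    (PySem.List.pyRange 0 pathsB.length 1).foldl (fun main iB =>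
      aElemLoop (PySem.List.pyGetD pathsA iA []) (PySem.List.pyGetD pathsB iB [])
        main (PySem.List.pyGetD pathsA iA [])) main) []

-- ===== PORT B =====
-- inner 'for i in range(len(pathsB)-1, -1, -1)': reverse scan = recurse on the tail first
def altFindB (pa : List Int) : List (List Int × PySem.Set Int) → Option (List Int)
  | [] => none
  | (pb, s) :: rest =>
    match altFindB pa rest with
    | some r => some r
    | none => if pa.any (fun e => PySem.Set.contains s e) then some (pa ++ pb.reverse) else none

-- outer 'for pa in reversed(pathsA)'
def altFindA (bs : List (List Int × PySem.Set Int)) : List (List Int) → Option (List Int)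
  | [] => none
  | pa :: rest =>
    match altFindA bs rest with
    | some r => some r
    | none => altFindB pa bs

def getVerticesBetween2Vertices_getMainPath_alt (pathsA : List (List Int)) (pathsB : List (List Int)) : List Int :=
  (altFindA (pathsB.map (fun pb => (pb, PySem.Set.ofList pb))) pathsA).getD []

-- ===== PRECONDITION & SPEC =====
def Spec_getVerticesBetween2Vertices_getMainPath (pathsA : List (List Int)) (pathsB : List (List Int)) (out : List Int) : Prop := out = getVerticesBetween2Vertices_getMainPath_alt pathsA pathsB
instance (pathsA : List (List Int)) (pathsB : List (List Int)) (out : List Int) : Decidable (Spec_getVerticesBetween2Vertices_getMainPath pathsA pathsB out) := by unfold Spec_getVerticesBetween2Vertices_getMainPath; infer_instance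

-- ===== CLAIM (what is proved, stated in full; the proofs are below) =====
def Claim_equal_getVerticesBetween2Vertices_getMainPath : Prop := ∀ (pathsA : List (List Int)) (pathsB : List (List Int)), Dom_getVerticesBetween2Vertices_getMainPath pathsA pathsB → Spec_getVerticesBetween2Vertices_getMainPath pathsA pathsB (getVerticesBetween2Vertices_getMainPath pathsA pathsB)

-- ===== LEMMAS AND PROOFS =====

theorem aElemLoop_eq (paFull pb main rest : List Int) :
    aElemLoop paFull pb main rest =
      if rest.any (fun e => pb.contains e) then paFull ++ pb.reverse else main := by
  induction rest with
  | nil => simp [aElemLoop]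
  | cons e t ih =>
    simp only [aElemLoop, List.any_cons, ih]
    by_cases hc : e ∈ pb <;> simp [hc]

theorem set_contains_list (s : PySem.Set Int) (e : Int) :
    PySem.Set.contains s e = List.contains s e := by
  by_cases h : e ∈ s <;> simp [PySem.Set.contains, h]

theorem ofList_contains (pb : List Int) (e : Int) :
    List.contains (PySem.Set.ofList pb) e = pb.contains e := by
  by_cases h : e ∈ pb <;> simp [h, PySem.Set.mem_ofList]

theorem altFindB_contains (pa : List Int) (pbs : List (List Int)) :
    altFindB pa (pbs.map (fun pb => (pb, PySem.Set.ofList pb))) =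
      altFindB pa (pbs.map (fun pb => (pb, pb))) := by
  induction pbs with
  | nil => rfl
  | cons pb rest ih => simp only [List.map_cons, altFindB, ih, set_contains_list, ofList_contains]

-- A's inner fold over pathsB (last overwrite) equals B's reverse scan of pathsB
theorem inner_eq (pa main : List Int) (pathsB : List (List Int)) :
    pathsB.foldl (fun m pb => aElemLoop pa pb m pa) main =
      ((altFindB pa (pathsB.map (fun pb => (pb, pb)))).getD main) := by
  induction pathsB generalizing main with
  | nil => rfl
  | cons pb rest ih =>
    simp only [List.foldl_cons, List.map_cons, altFindB, ih]
    cases h : altFindB pa (rest.map (fun pb => (pb, pb))) with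
    | some r => rfl
    | none =>
      simp only [Option.getD_none]
      rw [aElemLoop_eq]
      simp only [set_contains_list]
      split_ifs <;> simp

-- A's outer fold over pathsA equals B's reverse scan of pathsA
theorem outer_eq (pathsA pathsB : List (List Int)) (main : List Int) :
    pathsA.foldl (fun m pa => pathsB.foldl (fun m pb => aElemLoop pa pb m pa) m) main =
      ((altFindA (pathsB.map (fun pb => (pb, pb))) pathsA).getD main) := by
  induction pathsA generalizing main with
  | nil => rfl
  | cons pa rest ih =>
    simp only [List.foldl_cons, altFindA, ih]
    cases h : altFindA (pathsB.map (fun pb => (pb, pb))) rest with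
    | some r => rfl
    | none => simp only [Option.getD_none, inner_eq]

theorem altFindA_contains (pathsA pathsB : List (List Int)) :
    altFindA (pathsB.map (fun pb => (pb, PySem.Set.ofList pb))) pathsA =
      altFindA (pathsB.map (fun pb => (pb, pb))) pathsA := by
  induction pathsA with
  | nil => rfl
  | cons pa rest ih => simp only [altFindA, ih, altFindB_contains]

-- ===== VERDICT (by name: the statement is the Claim_ definition above) =====
theorem getVerticesBetween2Vertices_getMainPath_spec : Claim_equal_getVerticesBetween2Vertices_getMainPath := by
  intro pathsA pathsB _
  unfold Spec_getVerticesBetween2Vertices_getMainPath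
  unfold getVerticesBetween2Vertices_getMainPath getVerticesBetween2Vertices_getMainPath_alt
  rw [altFindA_contains, ← outer_eq]
  have hinner : ∀ (pa m : List Int),
      (PySem.List.pyRange 0 (pathsB.length : Int) 1).foldl
          (fun m iB => aElemLoop pa (PySem.List.pyGetD pathsB iB []) m pa) m
        = pathsB.foldl (fun m pb => aElemLoop pa pb m pa) m := fun pa m =>
    PySem.List.foldl_pyRange_zero_pyGetD' pathsB [] (fun m pb => aElemLoop pa pb m pa) m
  simp only [hinner]
  exact PySem.List.foldl_pyRange_zero_pyGetD' pathsA []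
    (fun m pa => pathsB.foldl (fun m pb => aElemLoop pa pb m pa) m) []
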